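-- pv_equiv track=rewrite | github.com/VPC-DevAdmin/xeon-agent-swarm | backend/agents/single_model.py | _pack_context
-- ===== SOURCE A (Python) =====
-- _CONTEXT_TOKEN_BUDGET = 2_800
--
-- _WORDS_PER_TOKEN = 0.75   # ~1.33 tokens per word
--
-- def _pack_context(chunks: list[dict], budget: int = _CONTEXT_TOKEN_BUDGET) -> tuple[str, int, list[dict]]:
--     """
--     Pack as many chunks as fit within the token budget.
--     Returns (context_string, token_estimate, included_chunks).
--     """
--     lines: list[str] = ["## Knowledge Base Context\n"]
--     token_estimate = 0
--     included: list[dict] = []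
--
--     for i, chunk in enumerate(chunks, 1):
--         snippet = chunk["text"][:800]
--         entry = f"### [{i}] {chunk['doc_title']} ({chunk['corpus']})\n{snippet}\n"
--         entry_tokens = int(len(entry.split()) / _WORDS_PER_TOKEN)
--         if token_estimate + entry_tokens > budget:
--             break
--         lines.append(entry)
--         token_estimate += entry_tokens
--         included.append(chunk)
--
--     return "\n".join(lines), token_estimate, included
-- ===== SOURCE B (Python) =====
-- _CONTEXT_TOKEN_BUDGET = 2_800
--
-- _WORDS_PER_TOKEN = 0.75   # ~1.33 tokens per word
--
--
-- def _pack_context(chunks: list[dict], budget: int = _CONTEXT_TOKEN_BUDGET) -> tuple[str, int, list[dict]]: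
--     """
--     Pack as many chunks as fit within the token budget.
--     Build-table-then-cut decomposition: materialise every entry and its token
--     cost, take prefix sums, and cut at the longest prefix within budget.
--     """
--     header = "## Knowledge Base Context\n"
--     entries = [
--         f"### [{i}] {c['doc_title']} ({c['corpus']})\n{c['text'][:800]}\n"
--         for i, c in enumerate(chunks, 1)
--     ]
--     costs = [len(e.split()) * 4 // 3 for e in entries]
--     sums = []
--     run = 0
--     for t in costs:
--         run += t
--         sums.append(run)
--     k = next((i for i, s in enumerate(sums) if s > budget), len(entries))
--     total = sums[k - 1] if k else 0
--     return "\n".join([header] + entries[:k]), total, chunks[:k]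
-- ===== Notes on version B (the rewrite author's own statement) =====
-- stated objective: alternative
-- what changed: Replaces A's incremental accumulate-and-break loop by a build-table-then-cut decomposition: all entries and their token costs are materialised up front, prefix sums locate the cut index k, and the result is assembled as join(header+entries[:k]), sums[k-1], chunks[:k].
import Mathlib
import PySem

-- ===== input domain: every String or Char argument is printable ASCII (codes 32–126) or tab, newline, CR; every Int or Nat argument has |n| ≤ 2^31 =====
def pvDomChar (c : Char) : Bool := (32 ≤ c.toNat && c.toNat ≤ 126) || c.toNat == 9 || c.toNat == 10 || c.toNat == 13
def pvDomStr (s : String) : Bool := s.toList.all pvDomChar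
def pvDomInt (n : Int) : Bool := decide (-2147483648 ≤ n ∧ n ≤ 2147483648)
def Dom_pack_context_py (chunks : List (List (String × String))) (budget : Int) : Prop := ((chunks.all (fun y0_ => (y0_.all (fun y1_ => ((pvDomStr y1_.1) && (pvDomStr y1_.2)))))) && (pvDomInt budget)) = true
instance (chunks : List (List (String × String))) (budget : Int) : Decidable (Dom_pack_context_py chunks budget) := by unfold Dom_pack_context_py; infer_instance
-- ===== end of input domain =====

-- B replaces A's accumulate-and-break loop by a build-table-then-cut decomposition
-- (entries + prefix sums, cut at the longest prefix within budget); alternative, same cost.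


-- ===== PORT A =====
-- shared by both ports: chunk[key] (Pre_ guarantees the key is present, so getD "" is never taken)
def pvKey (c : List (String × String)) (k : String) : String :=
  ((PySem.Dict.mk c).get? k).getD ""

-- f"### [{i}] {chunk['doc_title']} ({chunk['corpus']})\n{snippet}\n" with snippet = chunk['text'][:800]
def pvEntry (i : Int) (c : List (String × String)) : String :=
  let snippet := PySem.Str.slice (pvKey c "text") none (some 800)
  "### [" ++ PySem.Int.toStr i ++ "] " ++ pvKey c "doc_title" ++ " (" ++ pvKey c "corpus" ++ ")\n"
    ++ snippet ++ "\n"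

-- int(len(entry.split()) / 0.75) — exact as 4*n//3 on this domain (the float quotient
-- n/0.75 truncates to 4*n//3 for every word count n far below 2^50)
def pvTokens (e : String) : Int := (((PySem.Str.split₀ e).length * 4) / 3 : Nat)

-- loop body of A, with a 'broken' flag modelling the break
def pvStepA (budget : Int)
    (st : (List String × Int × List (List (String × String))) × Bool)
    (p : Int × List (String × String)) :
    (List String × Int × List (List (String × String))) × Bool :=
  if st.2 then st
  else
    let entry := pvEntry p.1 p.2
    let entry_tokens := pvTokens entry
    if budget < st.1.2.1 + entry_tokens then (st.1, true)
    else ((st.1.1 ++ [entry], st.1.2.1 + entry_tokens, st.1.2.2 ++ [p.2]), false)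

def pack_context_py (chunks : List (List (String × String))) (budget : Int) :
    String × Int × (List (List (String × String))) :=
  let fin := (PySem.List.enumerate chunks 1).foldl (pvStepA budget)
      ((["## Knowledge Base Context\n"], (0 : Int), ([] : List (List (String × String)))), false)
  (PySem.Str.join "\n" fin.1.1, fin.1.2.1, fin.1.2.2)

-- ===== PORT B =====
def pack_context_py_alt (chunks : List (List (String × String))) (budget : Int) :
    String × Int × (List (List (String × String))) :=
  let header := "## Knowledge Base Context\n"
  let entries := (PySem.List.enumerate chunks 1).map (fun p => pvEntry p.1 p.2)
  let costs := entries.map pvTokens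
  -- running prefix sums (the 'run += t; sums.append(run)' loop)
  let sums := (costs.foldl (fun (acc : List Int × Int) t => (acc.1 ++ [acc.2 + t], acc.2 + t))
      (([] : List Int), (0 : Int))).1
  -- k = next((i for i, s in enumerate(sums) if s > budget), len(entries))
  let k : Nat := (sums.findIdx? (fun s => decide (budget < s))).getD entries.length
  let total : Int := if k = 0 then 0 else sums.getD (k - 1) 0
  -- entries[:k] / chunks[:k] with k a nonnegative index is List.take k (exact)
  (PySem.Str.join "\n" (header :: entries.take k), total, chunks.take k)

-- ===== PRECONDITION & SPEC =====
-- Pre_ requires every chunk to carry the keys 'text', 'doc_title', 'corpus' (else A raises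
-- KeyError). This is slightly narrower than A's domain: A also returns when a key-missing
-- chunk lies strictly beyond its budget cut (B, which materialises all entries, raises there).
def Pre_pack_context_py (chunks : List (List (String × String))) (budget : Int) : Prop :=
  ∀ c ∈ chunks, ((PySem.Dict.mk c).get? "text").isSome = true ∧
    ((PySem.Dict.mk c).get? "doc_title").isSome = true ∧
    ((PySem.Dict.mk c).get? "corpus").isSome = true
instance (chunks : List (List (String × String))) (budget : Int) : Decidable (Pre_pack_context_py chunks budget) := by unfold Pre_pack_context_py; infer_instance

def pvWitness_pack_context_py : (List (List (String × String))) × Int :=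
  ([[("text", "a b c"), ("doc_title", "t"), ("corpus", "c")]], 50)

def Spec_pack_context_py (chunks : List (List (String × String))) (budget : Int) (out : String × Int × (List (List (String × String)))) : Prop := out = pack_context_py_alt chunks budget
instance (chunks : List (List (String × String))) (budget : Int) (out : String × Int × (List (List (String × String)))) : Decidable (Spec_pack_context_py chunks budget out) := by unfold Spec_pack_context_py; infer_instance

-- ===== CLAIM (what is proved, stated in full; the proofs are below) =====
def Claim_equal_pack_context_py : Prop := ∀ (chunks : List (List (String × String))) (budget : Int), Dom_pack_context_py chunks budget → Pre_pack_context_py chunks budget → Spec_pack_context_py chunks budget (pack_context_py chunks budget)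

-- ===== LEMMAS AND PROOFS =====

-- index of the first prefix whose cost pushes acc past the budget (length if none)
def pvCut (budget acc : Int) : List Int → Nat
  | [] => 0
  | t :: ts => if budget < acc + t then 0 else pvCut budget (acc + t) ts + 1

-- the prefix-sum list produced by B's running loop
def pvSums (run : Int) : List Int → List Int
  | [] => []
  | t :: ts => (run + t) :: pvSums (run + t) ts

theorem pvCut_le_length (budget acc : Int) (ts : List Int) : pvCut budget acc ts ≤ ts.length := by
  induction ts generalizing acc with
  | nil => simp [pvCut]
  | cons t ts ih =>
    simp only [pvCut, List.length_cons]
    split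
    · omega
    · exact Nat.succ_le_succ (ih _)

theorem pvStepA_broken (budget : Int) (x : List String × Int × List (List (String × String)))
    (ps : List (Int × List (String × String))) :
    ps.foldl (pvStepA budget) (x, true) = (x, true) := by
  induction ps with
  | nil => rfl
  | cons p ps ih => simpa [pvStepA] using ih

theorem pvFoldA (budget : Int) (ps : List (Int × List (String × String)))
    (L : List String) (T : Int) (I : List (List (String × String))) :
    (ps.foldl (pvStepA budget) ((L, T, I), false)).1 =
      (L ++ (ps.take (pvCut budget T (ps.map (fun p => pvTokens (pvEntry p.1 p.2))))).map
          (fun p => pvEntry p.1 p.2),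
       T + (((ps.take (pvCut budget T (ps.map (fun p => pvTokens (pvEntry p.1 p.2))))).map
          (fun p => pvTokens (pvEntry p.1 p.2))).sum),
       I ++ (ps.take (pvCut budget T (ps.map (fun p => pvTokens (pvEntry p.1 p.2))))).map (·.2)) := by
  induction ps generalizing L T I with
  | nil => simp [pvCut]
  | cons p ps ih =>
    simp only [List.map_cons, pvCut, List.foldl_cons]
    by_cases h : budget < T + pvTokens (pvEntry p.1 p.2)
    · simp only [if_pos h, pvStepA, Bool.false_eq_true, if_false]
      rw [pvStepA_broken]
      simp
    · simp only [if_neg h, pvStepA, Bool.false_eq_true, if_false]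
      rw [ih]
      simp [List.take_succ_cons, List.append_assoc]
      ring

theorem pvSums_foldl (ts : List Int) (acc : List Int) (run : Int) :
    (ts.foldl (fun (acc : List Int × Int) t => (acc.1 ++ [acc.2 + t], acc.2 + t)) (acc, run)).1 =
      acc ++ pvSums run ts := by
  induction ts generalizing acc run with
  | nil => simp [pvSums]
  | cons t ts ih => simp [pvSums, ih]

theorem pvFindIdx_cut (budget : Int) (ts : List Int) (run : Int) :
    ((pvSums run ts).findIdx? (fun s => decide (budget < s))).getD ts.length =
      pvCut budget run ts := by
  induction ts generalizing run with
  | nil => simp [pvSums, pvCut]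
  | cons t ts ih =>
    simp only [pvSums, pvCut, List.findIdx?_cons, List.length_cons]
    by_cases h : budget < run + t
    · simp [h]
    · simp only [h, decide_false, reduceIte]
      rw [← ih (run + t)]
      cases (pvSums (run + t) ts).findIdx? (fun s => decide (budget < s)) <;> simp

theorem pvSums_getD (ts : List Int) (run : Int) (j : Nat) (hj : j < ts.length) :
    (pvSums run ts).getD j 0 = run + (ts.take (j + 1)).sum := by
  induction ts generalizing run j with
  | nil => simp at hj
  | cons t ts ih =>
    cases j with
    | zero => simp [pvSums]
    | succ j =>
      simp only [pvSums, List.getD_cons_succ]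
      rw [ih _ _ (by simpa using hj)]
      simp [List.take_succ_cons]
      ring

-- ===== VERDICT (by name: the statement is the Claim_ definition above) =====
theorem pack_context_py_spec : Claim_equal_pack_context_py := by
  intro chunks budget _ _
  unfold Spec_pack_context_py pack_context_py pack_context_py_alt
  simp only
  have hts : ((PySem.List.enumerate chunks 1).map (fun p => pvEntry p.1 p.2)).map pvTokens
      = (PySem.List.enumerate chunks 1).map (fun p => pvTokens (pvEntry p.1 p.2)) := by
    simp
  rw [pvFoldA, pvSums_foldl, hts]
  simp only [List.nil_append]
  rw [show ((PySem.List.enumerate chunks 1).map (fun p => pvEntry p.1 p.2)).length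
      = ((PySem.List.enumerate chunks 1).map (fun p => pvTokens (pvEntry p.1 p.2))).length by simp]
  rw [pvFindIdx_cut]
  set ps := PySem.List.enumerate chunks 1 with hps
  set k := pvCut budget 0 (ps.map (fun p => pvTokens (pvEntry p.1 p.2))) with hk
  have hkle : k ≤ ps.length := by
    have h := pvCut_le_length budget 0 (ps.map (fun p => pvTokens (pvEntry p.1 p.2)))
    simpa using h
  refine Prod.ext ?_ (Prod.ext ?_ ?_)
  · -- joined context string
    simp only
    congr 1
    rw [List.map_take, List.singleton_append]
  · -- token estimate
    simp only
    by_cases hk0 : k = 0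
    · simp [hk0]
    · rw [if_neg hk0,
        pvSums_getD (ps.map (fun p => pvTokens (pvEntry p.1 p.2))) 0 (k - 1)
          (by simp only [List.length_map]; omega)]
      rw [Nat.sub_add_cancel (Nat.pos_of_ne_zero hk0)]
      rw [List.map_take]
  · -- included chunks
    simp only
    rw [List.map_take, hps, PySem.List.map_snd_enumerate]
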